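-- pv_equiv track=rewrite | github.com/Dong-yeong0/problem-solving | 프로그래머스/0/181918. 배열 만들기 4/배열 만들기 4.py | solution
-- ===== SOURCE A (Python) =====
-- def solution(arr):
--     stk = []
--     for num in arr:
--         if not stk:
--             stk.append(num)
--         else:
--             while stk and stk[-1] >= num:
--                 stk.pop()
--             stk.append(num)
--     return stk
-- ===== SOURCE B (Python) =====
-- def solution(arr):
--     res = []
--     m = None  # running strict suffix minimum; None = empty suffix
--     for num in reversed(arr):
--         if m is None or num < m:
--             res.append(num)
--             m = num
--     res.reverse()
--     return res
-- ===== Notes on version B (the rewrite author's own statement) =====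
-- stated objective: alternative
-- what changed: Replaces the monotonic-stack push/pop loop with a single backward scan keeping a running suffix minimum (keep num iff num < min of everything after it), then one reverse.
import Mathlib
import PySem

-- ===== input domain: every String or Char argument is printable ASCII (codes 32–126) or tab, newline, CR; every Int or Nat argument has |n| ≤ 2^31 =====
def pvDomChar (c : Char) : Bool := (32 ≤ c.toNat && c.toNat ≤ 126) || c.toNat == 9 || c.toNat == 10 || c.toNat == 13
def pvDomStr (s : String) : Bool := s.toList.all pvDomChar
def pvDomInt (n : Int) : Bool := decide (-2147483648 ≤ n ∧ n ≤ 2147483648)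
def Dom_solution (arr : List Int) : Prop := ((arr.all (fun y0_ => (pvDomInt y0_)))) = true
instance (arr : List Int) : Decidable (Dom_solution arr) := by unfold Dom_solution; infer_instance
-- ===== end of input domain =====

-- B replaces the monotonic-stack push/pop loop with a single backward scan keeping a
-- running suffix minimum, then one reverse (alternative decomposition; same results).

-- ===== PORT A =====
-- 'while stk and stk[-1] >= num: stk.pop()' — pop from the end while the last element is ≥ x
def popGE (stk : List Int) (x : Int) : List Int :=
  match h : stk.getLast? with
  | none => stk
  | some t => if t ≥ x then popGE stk.dropLast x else stk
termination_by stk.length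
decreasing_by
  cases stk with
  | nil => simp at h
  | cons a l => simp [List.length_dropLast]

def solution (arr : List Int) : List Int :=
  arr.foldl (fun stk num => if stk = [] then stk ++ [num] else popGE stk num ++ [num]) []

-- ===== PORT B =====
-- loop body: if m is None or num < m: res.append(num); m = num
def bstep (st : List Int × Option Int) (num : Int) : List Int × Option Int :=
  match st.2 with
  | none => (st.1 ++ [num], some num)
  | some v => if num < v then (st.1 ++ [num], some num) else st

def solution_alt (arr : List Int) : List Int :=
  ((arr.reverse.foldl bstep ([], none)).1).reverse

-- ===== PRECONDITION & SPEC =====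
def Spec_solution (arr : List Int) (out : List Int) : Prop := out = solution_alt arr
instance (arr : List Int) (out : List Int) : Decidable (Spec_solution arr out) := by unfold Spec_solution; infer_instance

-- ===== CLAIM (what is proved, stated in full; the proofs are below) =====
def Claim_equal_solution : Prop := ∀ (arr : List Int), Dom_solution arr → Spec_solution arr (solution arr)

-- ===== LEMMAS AND PROOFS =====

-- common specification: keep a iff a is strictly smaller than every later element
def gspec : List Int → List Int
  | [] => []
  | a :: rest => if rest.all (fun b => a < b) then a :: gspec rest else gspec rest

-- option-valued minimum, mirroring B's running m
def M : List Int → Option Int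
  | [] => none
  | a :: rest => some (match M rest with | none => a | some v => min a v)

lemma M_none (l : List Int) : M l = none ↔ l = [] := by
  cases l <;> simp [M]

lemma M_mem (l : List Int) (v : Int) (h : M l = some v) : v ∈ l := by
  induction l generalizing v with
  | nil => simp [M] at h
  | cons a rest ih =>
    simp only [M] at h
    cases hr : M rest with
    | none => rw [hr] at h; simp at h; simp [h]
    | some w =>
      rw [hr] at h
      simp at h
      rcases min_cases a w with ⟨he, _⟩ | ⟨he, _⟩
      · have hv : v = a := by omega
        rw [hv]; exact List.mem_cons_self
      · have hv : v = w := by omega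
        rw [hv]; exact List.mem_cons_of_mem _ (ih w hr)

lemma M_le (l : List Int) (v : Int) (h : M l = some v) : ∀ b ∈ l, v ≤ b := by
  induction l generalizing v with
  | nil => simp
  | cons a rest ih =>
    intro b hb
    simp only [M] at h
    cases hr : M rest with
    | none =>
      rw [M_none] at hr; subst hr
      simp [M] at h
      simp at hb
      omega
    | some w =>
      rw [hr] at h
      simp at h
      have h1 := min_le_left a w
      have h2 := min_le_right a w
      simp at hb
      rcases hb with hb | hb
      · omega
      · have := ih w hr b hb; omega

-- B's fold computes gspec (reversed) together with the running minimum
lemma Bloop (l : List Int) :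
    l.reverse.foldl bstep ([], none) = ((gspec l).reverse, M l) := by
  induction l with
  | nil => simp [gspec, M]
  | cons a rest ih =>
    have : (a :: rest).reverse = rest.reverse ++ [a] := by simp
    rw [this, List.foldl_append, ih]
    cases hr : M rest with
    | none =>
      have hre : rest = [] := (M_none rest).mp hr
      subst hre
      simp [bstep, gspec, M]
    | some v =>
      by_cases hav : a < v
      · have hall : rest.all (fun b => a < b) = true := by
          simp only [List.all_eq_true, decide_eq_true_iff]
          intro b hb
          have := M_le rest v hr b hb; omega
        simp [bstep, hav, gspec, hall, M, hr]
        omega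
      · have hall : rest.all (fun b => a < b) = false := by
          simp only [List.all_eq_false]
          exact ⟨v, M_mem rest v hr, by simpa using hav⟩
        simp [bstep, hav, gspec, hall, M, hr]
        omega

-- popGE on a strictly increasing stack removes exactly the elements ≥ x
lemma popGE_sorted (stk : List Int) (x : Int) (h : stk.Pairwise (· < ·)) :
    popGE stk x = stk.filter (fun s => decide (s < x)) := by
  induction stk using List.reverseRecOn with
  | nil => rw [popGE]; rfl
  | append_singleton ys t ih =>
    rw [popGE]
    split
    next heq => simp at heq
    next t' heq =>
    rw [List.getLast?_concat] at heq
    injection heq with heq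
    subst heq
    have hys : ys.Pairwise (· < ·) := (List.pairwise_append.mp h).1
    have hlt : ∀ s ∈ ys, s < t := by
      intro s hs
      exact (List.pairwise_append.mp h).2.2 s hs t (by simp)
    by_cases hx : t ≥ x
    · simp only [hx, if_true, List.dropLast_concat]
      rw [ih hys]
      rw [List.filter_append]
      have : List.filter (fun s => decide (s < x)) [t] = [] := by
        simp; omega
      rw [this, List.append_nil]
    · simp only [hx, if_false]
      rw [List.filter_append]
      have h1 : List.filter (fun s => decide (s < x)) ys = ys := by
        rw [List.filter_eq_self]
        intro s hs
        simp only [decide_eq_true_iff]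
        have := hlt s hs; omega
      have h2 : List.filter (fun s => decide (s < x)) [t] = [t] := by
        simp; omega
      rw [h1, h2]

lemma step_pairwise (stk : List Int) (a : Int) (h : stk.Pairwise (· < ·)) :
    (stk.filter (fun s => decide (s < a)) ++ [a]).Pairwise (· < ·) := by
  rw [List.pairwise_append]
  refine ⟨h.filter _, by simp, ?_⟩
  intro s hs b hb
  simp only [List.mem_singleton] at hb
  subst hb
  have := (List.mem_filter.mp hs).2
  simpa using this

-- A's fold invariant
lemma Aloop (l : List Int) : ∀ stk : List Int, stk.Pairwise (· < ·) →
    l.foldl (fun stk num => if stk = [] then stk ++ [num] else popGE stk num ++ [num]) stk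
      = stk.filter (fun s => l.all (fun b => s < b)) ++ gspec l := by
  induction l with
  | nil =>
    intro stk _
    simp [gspec]
  | cons a rest ih =>
    intro stk hp
    have hstep : (if stk = [] then stk ++ [a] else popGE stk a ++ [a])
        = stk.filter (fun s => decide (s < a)) ++ [a] := by
      by_cases he : stk = []
      · subst he; simp
      · simp only [he, if_false, popGE_sorted stk a hp]
    rw [List.foldl_cons, hstep, ih _ (step_pairwise stk a hp)]
    rw [List.filter_append]
    have hfil : (stk.filter (fun s => decide (s < a))).filter
          (fun s => rest.all (fun b => s < b))
        = stk.filter (fun s => (a :: rest).all (fun b => s < b)) := by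
      rw [List.filter_filter]
      apply List.filter_congr
      intro s _
      simp [List.all_cons, Bool.and_comm]
    rw [hfil]
    by_cases hall : rest.all (fun b => a < b) = true
    · have : List.filter (fun s => rest.all (fun b => s < b)) [a] = [a] := by
        simp [hall]
      rw [this]
      simp [gspec, hall]
    · have hallf : rest.all (fun b => a < b) = false := by
        simpa using hall
      have : List.filter (fun s => rest.all (fun b => s < b)) [a] = [] := by
        simp [hallf]
      rw [this]
      simp [gspec, hallf]

lemma solution_eq_gspec (arr : List Int) : solution arr = gspec arr := by
  unfold solution
  rw [Aloop arr [] List.Pairwise.nil]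
  simp

lemma solution_alt_eq_gspec (arr : List Int) : solution_alt arr = gspec arr := by
  unfold solution_alt
  rw [Bloop arr]
  simp

-- ===== VERDICT (by name: the statement is the Claim_ definition above) =====
theorem solution_spec : Claim_equal_solution := by
  intro arr _
  unfold Spec_solution
  rw [solution_eq_gspec, solution_alt_eq_gspec]
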